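-- pv_equiv track=rewrite | github.com/albano-a/SedBR | src/functions/v003_Sedbr.py | Sum_Lit
-- ===== SOURCE A (Python) =====
-- def Sum_Lit(x):
--     # Somas as porcentagem das litologias semelhantes
--     for i in range(len(x)):
--         A = x[i][0]
--
--         for j in range(len(x)):
--             if i != j:
--                 if A == x[j][0]:
--                     x[j][1] = int(x[i][1]) + int(x[j][1])
--                     x[i][1] = 0
--     return x
-- ===== SOURCE B (Python) =====
-- def Sum_Lit(x):
--     # One pass to total each lithology key, one pass to place the total on the
--     # first occurrence and 0 on the rest (rows are updated in place, like A).
--     sums = {}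
--     for row in x:
--         k = row[0]
--         sums[k] = sums.get(k, 0) + int(row[1])
--     seen = set()
--     for row in x:
--         k = row[0]
--         if k in seen:
--             row[1] = 0
--         else:
--             row[1] = sums[k]
--             seen.add(k)
--     return x
-- ===== Notes on version B (the rewrite author's own statement) =====
-- stated objective: faster
-- what changed: Replaced A's O(n^2) nested index loops that repeatedly shuttle partial sums between rows by a single dict pass totalling each lithology key plus one pass writing the total on the key's first row and 0 on the rest.
-- outside the precondition, e.g. on Sum_Lit([[5]]): A returns [[5]], B raises IndexError
import Mathlib
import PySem

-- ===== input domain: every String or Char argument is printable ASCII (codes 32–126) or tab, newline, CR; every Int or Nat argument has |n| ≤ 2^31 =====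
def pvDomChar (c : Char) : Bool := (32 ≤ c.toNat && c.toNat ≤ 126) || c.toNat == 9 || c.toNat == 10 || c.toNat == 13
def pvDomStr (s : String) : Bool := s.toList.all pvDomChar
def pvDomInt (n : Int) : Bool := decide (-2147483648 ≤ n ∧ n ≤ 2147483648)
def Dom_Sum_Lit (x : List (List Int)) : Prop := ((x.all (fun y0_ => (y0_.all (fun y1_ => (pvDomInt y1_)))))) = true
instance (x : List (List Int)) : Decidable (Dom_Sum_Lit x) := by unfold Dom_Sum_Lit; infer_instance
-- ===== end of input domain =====

-- B replaces A's O(n^2) nested in-place index loops by one dict pass totalling each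
-- lithology key plus one pass writing the total on the key's first row and 0 on the rest.
-- Both A and B mutate the rows of the argument in place in Python; the equivalence proved
-- here is about the returned value (which is the same mutated list object in both).

-- ===== PORT A =====
-- literal transliteration of A; `int()` on an int is the identity, so it is dropped.
def Sum_Lit (x : List (List Int)) : List (List Int) :=
  (PySem.List.pyRange 0 (x.length : Int) 1).foldl (fun y i =>
    let A := PySem.List.pyGetD (PySem.List.pyGetD y i []) 0 0
    (PySem.List.pyRange 0 (y.length : Int) 1).foldl (fun z j =>
      if i ≠ j then
        if A = PySem.List.pyGetD (PySem.List.pyGetD z j []) 0 0 then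
          let z1 := PySem.List.pySetD z j (PySem.List.pySetD (PySem.List.pyGetD z j []) 1
            (PySem.List.pyGetD (PySem.List.pyGetD z i []) 1 0 +
             PySem.List.pyGetD (PySem.List.pyGetD z j []) 1 0))
          PySem.List.pySetD z1 i (PySem.List.pySetD (PySem.List.pyGetD z1 i []) 1 0)
        else z
      else z) y) x

-- ===== PORT B =====
-- transliteration of Source B; `sums[k]` in the second pass is modelled by getD (the key is
-- always present there, so Python raises nothing).
def Sum_Lit_alt (x : List (List Int)) : List (List Int) :=
  let sums := x.foldl (fun d row =>
      let k := PySem.List.pyGetD row 0 0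
      PySem.Dict.insert d k (PySem.Dict.getD d k 0 + PySem.List.pyGetD row 1 0))
    PySem.Dict.empty
  (x.foldl (fun (acc : List (List Int) × PySem.Set Int) row =>
      let k := PySem.List.pyGetD row 0 0
      if PySem.Set.contains acc.2 k then
        (acc.1 ++ [PySem.List.pySetD row 1 0], acc.2)
      else
        (acc.1 ++ [PySem.List.pySetD row 1 (PySem.Dict.getD sums k 0)], PySem.Set.add acc.2 k))
    ([], PySem.Set.empty)).1

-- ===== PRECONDITION & SPEC =====
-- Pre_ excludes lists containing a row of fewer than 2 elements: there A raises IndexError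
-- whenever that row's key is duplicated (or the row is empty), and B always raises on such
-- a row; on a short row with a unique key A still returns the list unchanged (see cites).
def Pre_Sum_Lit (x : List (List Int)) : Prop := ∀ r ∈ x, 2 ≤ r.length
instance (x : List (List Int)) : Decidable (Pre_Sum_Lit x) := by unfold Pre_Sum_Lit; infer_instance

def pvWitness_Sum_Lit : List (List Int) := [[1, 2], [1, 3], [2, 5]]

def Spec_Sum_Lit (x : List (List Int)) (out : List (List Int)) : Prop := out = Sum_Lit_alt x
instance (x : List (List Int)) (out : List (List Int)) : Decidable (Spec_Sum_Lit x out) := by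
  unfold Spec_Sum_Lit; infer_instance

-- ===== CLAIM (what is proved, stated in full; the proofs are below) =====
def Claim_equal_Sum_Lit : Prop :=
  ∀ (x : List (List Int)), Dom_Sum_Lit x → Pre_Sum_Lit x → Spec_Sum_Lit x (Sum_Lit x)

-- ===== LEMMAS AND PROOFS =====

-- generic: a fold whose every step fixes the start state never moves
lemma foldl_fixed {α β : Type} (f : β → α → β) (l : List α) (b : β)
    (h : ∀ a ∈ l, f b a = b) : l.foldl f b = b := by
  induction l with
  | nil => rfl
  | cons a l ih =>
      rw [List.foldl_cons, h a (by simp)]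
      exact ih (fun a' ha' => h a' (by simp [ha']))

lemma getD_eq_get {α : Type} (x : List α) (d : α) {p : Nat} (h : p < x.length) :
    x.getD p d = x[p] := by
  simp [List.getD_eq_getElem?_getD, List.getElem?_eq_getElem h]

-- row-level facts about `set 1`
lemma getD0_set1 (r : List Int) (v d : Int) : (r.set 1 v).getD 0 d = r.getD 0 d := by
  simp [List.getD_eq_getElem?_getD, List.getElem?_set_ne (by decide : (1 : Nat) ≠ 0)]

lemma getD1_set1 (r : List Int) (v : Int) (h : 2 ≤ r.length) : (r.set 1 v).getD 1 0 = v := by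
  simp [List.getD_eq_getElem?_getD, List.getElem?_set_self (show 1 < r.length by omega)]

lemma set1_getD1 (r : List Int) (h : 2 ≤ r.length) : r.set 1 (r.getD 1 0) = r := by
  have h1 : 1 < r.length := by omega
  rw [getD_eq_get r 0 h1]
  exact List.set_getElem_self h1

-- index-level views of the input
def keyAt (x : List (List Int)) (p : Nat) : Int := (x.getD p []).getD 0 0
def valAt (x : List (List Int)) (p : Nat) : Int := (x.getD p []).getD 1 0
def cnt (x : List (List Int)) (m : Nat) (k : Int) : Nat :=
  (List.range m).countP (fun q => decide (keyAt x q = k))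
def gsum (x : List (List Int)) (m : Nat) (k : Int) : Int :=
  (((List.range m).filter (fun q => decide (keyAt x q = k))).map (valAt x)).sum

lemma cnt_succ (x : List (List Int)) (m : Nat) (k : Int) :
    cnt x (m + 1) k = cnt x m k + (if keyAt x m = k then 1 else 0) := by
  simp [cnt, List.range_succ, List.countP_append, List.countP_cons]

lemma gsum_succ (x : List (List Int)) (m : Nat) (k : Int) :
    gsum x (m + 1) k = gsum x m k + (if keyAt x m = k then valAt x m else 0) := by
  simp only [gsum, List.range_succ, List.filter_append, List.map_append, List.sum_append]
  split_ifs with h <;> simp [h]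

lemma cnt_le (x : List (List Int)) (k : Int) {a b : Nat} (h : a ≤ b) :
    cnt x a k ≤ cnt x b k := by
  induction b, h using Nat.le_induction with
  | base => exact le_refl _
  | succ b hb ih => rw [cnt_succ]; split_ifs <;> omega

lemma cnt_lt_of_mem (x : List (List Int)) {p m : Nat} {k : Int}
    (hpm : p < m) (hk : keyAt x p = k) : cnt x p k < cnt x m k := by
  have h1 : cnt x (p + 1) k = cnt x p k + 1 := by rw [cnt_succ]; simp [hk]
  have h2 := cnt_le x k (show p + 1 ≤ m from hpm)
  omega

lemma ord_inj (x : List (List Int)) {p q : Nat} {k : Int}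
    (hp : keyAt x p = k) (hq : keyAt x q = k) (h : cnt x p k = cnt x q k) : p = q := by
  rcases Nat.lt_trichotomy p q with h' | h' | h'
  · exact absurd (cnt_lt_of_mem x h' hp) (by omega)
  · exact h'
  · exact absurd (cnt_lt_of_mem x h' hq) (by omega)

lemma cnt_of_no_mem (x : List (List Int)) {k : Int} {a b : Nat} (hab : a ≤ b)
    (h : ∀ q, a ≤ q → q < b → keyAt x q ≠ k) : cnt x b k = cnt x a k := by
  induction b, hab using Nat.le_induction with
  | base => rfl
  | succ b hb ih =>
      rw [cnt_succ, ih (fun q h1 h2 => h q h1 (by omega))]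
      simp [h b hb (by omega)]

lemma gsum_of_no_mem (x : List (List Int)) {k : Int} {a b : Nat} (hab : a ≤ b)
    (h : ∀ q, a ≤ q → q < b → keyAt x q ≠ k) : gsum x b k = gsum x a k := by
  induction b, hab using Nat.le_induction with
  | base => rfl
  | succ b hb ih =>
      rw [gsum_succ, ih (fun q h1 h2 => h q h1 (by omega))]
      simp [h b hb (by omega)]

lemma gsum_zero_of_cnt (x : List (List Int)) {m : Nat} {k : Int}
    (h : cnt x m k = 0) : gsum x m k = 0 := by
  unfold cnt at h
  unfold gsum
  rw [List.filter_eq_nil_iff.mpr (by simpa using List.countP_eq_zero.mp h)]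
  rfl

lemma exists_ord (x : List (List Int)) {k : Int} {s m : Nat} (h : s < cnt x m k) :
    ∃ p, p < m ∧ keyAt x p = k ∧ cnt x p k = s := by
  induction m with
  | zero => simp [cnt] at h
  | succ m ih =>
      by_cases h' : s < cnt x m k
      · obtain ⟨p, h1, h2, h3⟩ := ih h'
        exact ⟨p, by omega, h2, h3⟩
      · rw [cnt_succ] at h
        by_cases hk : keyAt x m = k
        · refine ⟨m, by omega, hk, ?_⟩
          simp [hk] at h
          omega
        · simp [hk] at h
          omega

-- the value held at position p after the first m outer iterations of A
def formula (x : List (List Int)) (m p : Nat) : Int :=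
  if cnt x x.length (keyAt x p) = 1 ∨ cnt x m (keyAt x p) = 0 then valAt x p
  else if cnt x m (keyAt x p) = 1 then
    (if cnt x p (keyAt x p) = 0 then 0
     else if cnt x p (keyAt x p) = 1 then gsum x (p + 1) (keyAt x p) else valAt x p)
  else
    (if cnt x p (keyAt x p) = 0 then gsum x m (keyAt x p)
     else if cnt x p (keyAt x p) < cnt x m (keyAt x p) then 0 else valAt x p)

def stateSpec (x : List (List Int)) (m : Nat) : List (List Int) :=
  (List.range x.length).map (fun p => (x.getD p []).set 1 (formula x m p))

def finalSpec (x : List (List Int)) : List (List Int) :=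
  (List.range x.length).map (fun p =>
    (x.getD p []).set 1
      (if cnt x p (keyAt x p) = 0 then gsum x x.length (keyAt x p) else 0))

-- natified versions of the two ports
def setVal (y : List (List Int)) (j : Nat) (v : Int) : List (List Int) :=
  y.set j ((y.getD j []).set 1 v)

def stepN (A : Int) (i : Nat) (z : List (List Int)) (j : Nat) : List (List Int) :=
  if i ≠ j then
    if A = keyAt z j then setVal (setVal z j (valAt z i + valAt z j)) i 0 else z
  else z

def innerN (y : List (List Int)) (i : Nat) : List (List Int) :=
  (List.range y.length).foldl (stepN (keyAt y i) i) y

lemma pySetD_one (xs : List Int) (v : Int) : PySem.List.pySetD xs 1 v = xs.set 1 v := by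
  rw [PySem.List.pySetD_of_nonneg _ _ (by norm_num)]
  norm_num

lemma natifyA (x : List (List Int)) :
    Sum_Lit x = (List.range x.length).foldl innerN x := by
  unfold Sum_Lit
  rw [PySem.List.pyRange_zero_nat, List.foldl_map]
  congr 1
  funext y i
  unfold innerN stepN setVal keyAt valAt
  rw [PySem.List.pyRange_zero_nat, List.foldl_map]
  congr 1
  funext z j
  simp [PySem.List.pyGetD_natCast, PySem.List.pyGetD_ofNat',
    PySem.List.pySetD_natCast, pySetD_one, ne_eq, Nat.cast_inj]

def sumStepN (d : PySem.Dict Int Int) (row : List Int) : PySem.Dict Int Int :=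
  d.insert (row.getD 0 0) (d.getD (row.getD 0 0) 0 + row.getD 1 0)

def sumsOf (x : List (List Int)) : PySem.Dict Int Int := x.foldl sumStepN PySem.Dict.empty

def pass2Step (sums : PySem.Dict Int Int) (acc : List (List Int) × PySem.Set Int)
    (row : List Int) : List (List Int) × PySem.Set Int :=
  if PySem.Set.contains acc.2 (row.getD 0 0) then
    (acc.1 ++ [row.set 1 0], acc.2)
  else
    (acc.1 ++ [row.set 1 (PySem.Dict.getD sums (row.getD 0 0) 0)],
     PySem.Set.add acc.2 (row.getD 0 0))

def altN (x : List (List Int)) : List (List Int) :=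
  (x.foldl (pass2Step (sumsOf x)) ([], PySem.Set.empty)).1

lemma natifyB (x : List (List Int)) : Sum_Lit_alt x = altN x := by
  unfold Sum_Lit_alt altN pass2Step sumsOf sumStepN
  simp [PySem.List.pyGetD_ofNat', pySetD_one]

-- facts about stateSpec and setVal
lemma length_stateSpec (x : List (List Int)) (m : Nat) :
    (stateSpec x m).length = x.length := by simp [stateSpec]

lemma getElem_stateSpec (x : List (List Int)) (m : Nat) {p : Nat} (h : p < x.length)
    (h' : p < (stateSpec x m).length) :
    (stateSpec x m)[p] = (x.getD p []).set 1 (formula x m p) := by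
  simp [stateSpec]

lemma getD_stateSpec (x : List (List Int)) (m : Nat) {p : Nat} (h : p < x.length) :
    (stateSpec x m).getD p [] = (x.getD p []).set 1 (formula x m p) := by
  rw [getD_eq_get _ _ (by rw [length_stateSpec]; exact h)]
  exact getElem_stateSpec x m h _

lemma keyAt_stateSpec (x : List (List Int)) (m : Nat) {p : Nat} (h : p < x.length) :
    keyAt (stateSpec x m) p = keyAt x p := by
  unfold keyAt
  rw [getD_stateSpec x m h, getD0_set1]

lemma row_len (x : List (List Int)) (hpre : ∀ r ∈ x, 2 ≤ r.length) {p : Nat}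
    (h : p < x.length) : 2 ≤ (x.getD p []).length := by
  rw [getD_eq_get _ _ h]
  exact hpre _ (x.getElem_mem h)

lemma rowlen_stateSpec (x : List (List Int)) (m : Nat) {p : Nat} (h : p < x.length) :
    ((stateSpec x m).getD p []).length = (x.getD p []).length := by
  rw [getD_stateSpec x m h, List.length_set]

lemma valAt_stateSpec (x : List (List Int)) (hpre : ∀ r ∈ x, 2 ≤ r.length) (m : Nat)
    {p : Nat} (h : p < x.length) : valAt (stateSpec x m) p = formula x m p := by
  unfold valAt
  rw [getD_stateSpec x m h, getD1_set1 _ _ (row_len x hpre h)]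

lemma length_setVal (y : List (List Int)) (j : Nat) (v : Int) :
    (setVal y j v).length = y.length := by simp [setVal]

lemma getD_setVal_ne (y : List (List Int)) {p j : Nat} (v : Int) (h : p ≠ j) :
    (setVal y j v).getD p [] = y.getD p [] := by
  simp [setVal, List.getD_eq_getElem?_getD, List.getElem?_set_ne (Ne.symm h)]

lemma getD_setVal_self (y : List (List Int)) {j : Nat} (v : Int) (h : j < y.length) :
    (setVal y j v).getD j [] = (y.getD j []).set 1 v := by
  simp [setVal, List.getD_eq_getElem?_getD, List.getElem?_set_self h]

lemma keyAt_setVal (y : List (List Int)) (j : Nat) (v : Int) (p : Nat) :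
    keyAt (setVal y j v) p = keyAt y p := by
  by_cases hj : j < y.length
  · by_cases hp : p = j
    · subst hp
      unfold keyAt
      rw [getD_setVal_self y v hj, getD0_set1]
    · unfold keyAt
      rw [getD_setVal_ne y v hp]
  · unfold setVal
    rw [List.set_eq_of_length_le (by omega)]

lemma rowlen_setVal (y : List (List Int)) (j : Nat) (v : Int) (p : Nat) :
    ((setVal y j v).getD p []).length = (y.getD p []).length := by
  by_cases hj : j < y.length
  · by_cases hp : p = j
    · subst hp
      rw [getD_setVal_self y v hj, List.length_set]
    · rw [getD_setVal_ne y v hp]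
  · unfold setVal
    rw [List.set_eq_of_length_le (by omega)]

lemma valAt_setVal_self (y : List (List Int)) {j : Nat} (v : Int) (hj : j < y.length)
    (hr : 2 ≤ (y.getD j []).length) : valAt (setVal y j v) j = v := by
  unfold valAt
  rw [getD_setVal_self y v hj, getD1_set1 _ _ hr]

lemma setVal_eq_self (y : List (List Int)) {j : Nat} {v : Int} (hj : j < y.length)
    (hr : 2 ≤ (y.getD j []).length) (hv : valAt y j = v) : setVal y j v = y := by
  unfold setVal
  rw [← hv]
  unfold valAt
  rw [set1_getD1 _ hr, getD_eq_get _ _ hj]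
  exact List.set_getElem_self hj

lemma getElem_setVal (y : List (List Int)) (j : Nat) (v : Int) {p : Nat}
    (hp : p < y.length) (hp' : p < (setVal y j v).length) :
    (setVal y j v)[p] = if p = j then (y.getD j []).set 1 v else y[p] := by
  by_cases h : p = j
  · subst h
    simp [setVal, List.getElem_set_self]
  · simp [setVal, List.getElem_set_ne (Ne.symm h), h]

-- the inner loop of A: no other row shares the key → no-op
lemma inner_no_match (y : List (List Int)) (i : Nat)
    (h : ∀ j, j < y.length → j ≠ i → keyAt y j ≠ keyAt y i) : innerN y i = y := by
  apply foldl_fixed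
  intro j hj
  rw [List.mem_range] at hj
  unfold stepN
  by_cases hji : i = j
  · simp [hji]
  · have hk : ¬ keyAt y i = keyAt y j :=
      fun he => h j hj (fun e => hji e.symm) he.symm
    simp [hji, hk]

-- the inner loop of A: the least other row j₀ sharing the key receives row i's value,
-- row i is zeroed, everything else is untouched
lemma inner_match (y : List (List Int)) (i j₀ : Nat)
    (hi : i < y.length) (hj₀ : j₀ < y.length) (hne : j₀ ≠ i)
    (hkey : keyAt y j₀ = keyAt y i)
    (hmin : ∀ j, j < j₀ → j ≠ i → keyAt y j ≠ keyAt y i)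
    (hrows : ∀ p, p < y.length → 2 ≤ (y.getD p []).length) :
    innerN y i = setVal (setVal y j₀ (valAt y i + valAt y j₀)) i 0 := by
  unfold innerN
  set y' := setVal (setVal y j₀ (valAt y i + valAt y j₀)) i 0 with hy'
  have hky' : ∀ p, keyAt y' p = keyAt y p := by
    intro p
    rw [hy', keyAt_setVal, keyAt_setVal]
  have hlen' : y'.length = y.length := by rw [hy', length_setVal, length_setVal]
  have hrows' : ∀ p, p < y'.length → 2 ≤ (y'.getD p []).length := by
    intro p hp
    rw [hy', rowlen_setVal, rowlen_setVal]
    exact hrows p (by omega)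
  have hij₀ : i ≠ j₀ := fun e => hne e.symm
  have hvi : valAt y' i = 0 := by
    rw [hy']
    refine valAt_setVal_self _ 0 (by rw [length_setVal]; exact hi) ?_
    rw [rowlen_setVal]
    exact hrows i hi
  have hsplit : List.range y.length =
      List.range j₀ ++ [j₀] ++ (List.range (y.length - (j₀ + 1))).map ((j₀ + 1) + ·) := by
    rw [← List.range_succ, ← List.range_add]
    congr 1
    omega
  rw [hsplit, List.foldl_append, List.foldl_append]
  have phase1 : (List.range j₀).foldl (stepN (keyAt y i) i) y = y := by
    apply foldl_fixed
    intro j hj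
    rw [List.mem_range] at hj
    unfold stepN
    by_cases hji : i = j
    · simp [hji]
    · have hk : ¬ keyAt y i = keyAt y j :=
        fun he => hmin j hj (fun e => hji e.symm) he.symm
      simp [hji, hk]
  rw [phase1]
  have phase2 : List.foldl (stepN (keyAt y i) i) y [j₀] = y' := by
    simp only [List.foldl_cons, List.foldl_nil]
    unfold stepN
    rw [if_pos hij₀, if_pos hkey.symm]
  rw [phase2]
  rw [List.foldl_map]
  apply foldl_fixed
  intro b hb
  rw [List.mem_range] at hb
  set j := j₀ + 1 + b with hjdef
  have hjlt : j < y.length := by omega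
  have hjgt : j₀ < j := by omega
  unfold stepN
  by_cases hji : i = j
  · simp [hji]
  · rw [if_pos hji]
    by_cases hk : keyAt y i = keyAt y' j
    · rw [if_pos hk]
      rw [hvi, zero_add]
      have hjne : j ≠ i := fun e => hji e.symm
      have h1 : setVal y' j (valAt y' j) = y' :=
        setVal_eq_self _ (by omega) (hrows' j (by omega)) rfl
      rw [h1]
      exact setVal_eq_self _ (by omega) (hrows' i (by omega)) hvi
    · rw [if_neg hk]

-- arithmetic core: one outer iteration with no other matching row leaves the formula alone
lemma formula_nomatch (x : List (List Int)) {m : Nat} (hm : m < x.length)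
    (hno : ∀ j, j < x.length → j ≠ m → keyAt x j ≠ keyAt x m) :
    ∀ p, p < x.length → formula x m p = formula x (m + 1) p := by
  intro p hp
  have ht0 : cnt x m (keyAt x m) = 0 := by
    by_contra h0
    obtain ⟨q, hq1, hq2, _⟩ := exists_ord x (show 0 < cnt x m (keyAt x m) by omega)
    exact hno q (by omega) (by omega) hq2
  have hsz : cnt x x.length (keyAt x m) = 1 := by
    have h1 : cnt x x.length (keyAt x m) = cnt x (m + 1) (keyAt x m) := by
      rcases Nat.eq_or_lt_of_le (show m + 1 ≤ x.length by omega) with h | h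
      · rw [h]
      · exact cnt_of_no_mem x (by omega) (fun q hq1 hq2 => hno q (by omega) (by omega))
    rw [h1, cnt_succ, ht0]
    simp
  by_cases hkp : keyAt x p = keyAt x m
  · unfold formula
    rw [hkp, if_pos (Or.inl hsz), if_pos (Or.inl hsz)]
  · have hc : cnt x (m + 1) (keyAt x p) = cnt x m (keyAt x p) := by
      rw [cnt_succ]
      simp [show ¬ keyAt x m = keyAt x p from fun e => hkp e.symm]
    have hg : gsum x (m + 1) (keyAt x p) = gsum x m (keyAt x p) := by
      rw [gsum_succ]
      simp [show ¬ keyAt x m = keyAt x p from fun e => hkp e.symm]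
    unfold formula
    rw [hc, hg]

-- arithmetic core: effect of one outer iteration of A on the per-position formula,
-- where j₀ is the least other row with the same key as row m
lemma formula_step (x : List (List Int)) {m j₀ : Nat} (hm : m < x.length)
    (hj₀ : j₀ < x.length) (hne : j₀ ≠ m)
    (hkey : keyAt x j₀ = keyAt x m)
    (hmin : ∀ j, j < j₀ → j ≠ m → keyAt x j ≠ keyAt x m) :
    ∀ p, p < x.length →
      (if p = m then 0
       else if p = j₀ then formula x m m + formula x m j₀
       else formula x m p) = formula x (m + 1) p := by
  have hsucc : cnt x (m + 1) (keyAt x m) = cnt x m (keyAt x m) + 1 := by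
    rw [cnt_succ]; simp
  have hsucc' : ∀ k', k' ≠ keyAt x m → cnt x (m + 1) k' = cnt x m k' := by
    intro k' h
    rw [cnt_succ]
    simp [show ¬ keyAt x m = k' from fun e => h e.symm]
  have hgs : gsum x (m + 1) (keyAt x m) = gsum x m (keyAt x m) + valAt x m := by
    rw [gsum_succ]; simp
  have hgs' : ∀ k', k' ≠ keyAt x m → gsum x (m + 1) k' = gsum x m k' := by
    intro k' h
    rw [gsum_succ]
    simp [show ¬ keyAt x m = k' from fun e => h e.symm]
  have hsz : 2 ≤ cnt x x.length (keyAt x m) := by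
    rcases Nat.lt_trichotomy j₀ m with h | h | h
    · have h1 := cnt_lt_of_mem x h hkey
      have h2 := cnt_lt_of_mem x hm (rfl : keyAt x m = keyAt x m)
      omega
    · exact absurd h hne
    · have h1 := cnt_lt_of_mem x h (rfl : keyAt x m = keyAt x m)
      have h2 := cnt_lt_of_mem x hj₀ hkey
      omega
  rcases Nat.lt_trichotomy m j₀ with hcase | hcase | hcase
  · -- m < j₀ : row m is the first of its group, j₀ the second
    have ht0 : cnt x m (keyAt x m) = 0 := by
      by_contra h0
      obtain ⟨q, hq1, hq2, _⟩ := exists_ord x (show 0 < cnt x m (keyAt x m) by omega)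
      exact hmin q (by omega) (by omega) hq2
    have hordj : cnt x j₀ (keyAt x m) = 1 := by
      rw [cnt_of_no_mem x (show m + 1 ≤ j₀ by omega)
            (fun q h1 h2 => hmin q h2 (by omega)), hsucc, ht0]
    have hgj : gsum x (j₀ + 1) (keyAt x m) = valAt x m + valAt x j₀ := by
      rw [gsum_succ,
          gsum_of_no_mem x (show m + 1 ≤ j₀ by omega)
            (fun q h1 h2 => hmin q h2 (by omega)), hgs, gsum_zero_of_cnt x ht0]
      simp [hkey]
    intro p hp
    by_cases hpm : p = m
    · subst hpm
      rw [if_pos rfl]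
      unfold formula
      rw [hsucc, ht0]
      rw [if_neg (by omega : ¬ (cnt x x.length (keyAt x p) = 1 ∨ 0 + 1 = 0)),
          if_pos (by omega : 0 + 1 = 1)]
      simp
    · by_cases hpj : p = j₀
      · subst hpj
        rw [if_neg hpm, if_pos rfl]
        have hfmm : formula x m m = valAt x m := by
          unfold formula
          rw [if_pos (Or.inr ht0)]
        have hfmj : formula x m p = valAt x p := by
          unfold formula
          rw [hkey, if_pos (Or.inr ht0)]
        have hfj : formula x (m + 1) p = gsum x (p + 1) (keyAt x m) := by
          unfold formula
          rw [hkey, hsucc, ht0]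
          rw [if_neg (by omega : ¬ (cnt x x.length (keyAt x m) = 1 ∨ 0 + 1 = 0)),
              if_pos (by omega : 0 + 1 = 1),
              if_neg (by omega : ¬ cnt x p (keyAt x m) = 0), if_pos hordj]
        rw [hfmm, hfmj, hfj, hgj]
      · rw [if_neg hpm, if_neg hpj]
        by_cases hkp : keyAt x p = keyAt x m
        · have hj₀p : j₀ < p := by
            rcases Nat.lt_trichotomy p j₀ with h | h | h
            · exact absurd hkp (hmin p h hpm)
            · exact absurd h hpj
            · exact h
          have hordp : 2 ≤ cnt x p (keyAt x m) := by
            have h1 : cnt x (j₀ + 1) (keyAt x m) = 2 := by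
              rw [cnt_succ, hordj]
              simp [hkey]
            have h2 := cnt_le x (keyAt x m) (show j₀ + 1 ≤ p by omega)
            omega
          have hfa : formula x m p = valAt x p := by
            unfold formula
            rw [hkp, if_pos (Or.inr ht0)]
          have hfb : formula x (m + 1) p = valAt x p := by
            unfold formula
            rw [hkp, hsucc, ht0]
            rw [if_neg (by omega : ¬ (cnt x x.length (keyAt x m) = 1 ∨ 0 + 1 = 0)),
                if_pos (by omega : 0 + 1 = 1),
                if_neg (by omega : ¬ cnt x p (keyAt x m) = 0),
                if_neg (by omega : ¬ cnt x p (keyAt x m) = 1)]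
          rw [hfa, hfb]
        · unfold formula
          rw [hsucc' _ hkp, hgs' _ hkp]
  · exact absurd hcase.symm hne
  · -- j₀ < m : j₀ is the first of the group
    have hordj0 : cnt x j₀ (keyAt x m) = 0 := by
      by_contra h0
      obtain ⟨q, hq1, hq2, _⟩ := exists_ord x (show 0 < cnt x j₀ (keyAt x m) by omega)
      exact hmin q (by omega) (by omega) hq2
    have ht1 : 1 ≤ cnt x m (keyAt x m) := by
      have := cnt_lt_of_mem x hcase hkey
      omega
    intro p hp
    by_cases hpm : p = m
    · subst hpm
      rw [if_pos rfl]
      unfold formula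
      rw [hsucc]
      rw [if_neg (by omega :
            ¬ (cnt x x.length (keyAt x p) = 1 ∨ cnt x p (keyAt x p) + 1 = 0)),
          if_neg (by omega : ¬ cnt x p (keyAt x p) + 1 = 1),
          if_neg (by omega : ¬ cnt x p (keyAt x p) = 0),
          if_pos (by omega : cnt x p (keyAt x p) < cnt x p (keyAt x p) + 1)]
    · by_cases hpj : p = j₀
      · subst hpj
        rw [if_neg hpm, if_pos rfl]
        have hfj : formula x (m + 1) p = gsum x (m + 1) (keyAt x m) := by
          unfold formula
          rw [hkey, hsucc]
          rw [if_neg (by omega :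
                ¬ (cnt x x.length (keyAt x m) = 1 ∨ cnt x m (keyAt x m) + 1 = 0)),
              if_neg (by omega : ¬ cnt x m (keyAt x m) + 1 = 1), if_pos hordj0]
        by_cases ht : cnt x m (keyAt x m) = 1
        · have hfmm : formula x m m = gsum x (m + 1) (keyAt x m) := by
            unfold formula
            rw [if_neg (by omega : ¬ (cnt x x.length (keyAt x m) = 1 ∨ cnt x m (keyAt x m) = 0)),
                if_pos ht, if_neg (by omega : ¬ cnt x m (keyAt x m) = 0), if_pos ht]
          have hfmj : formula x m p = 0 := by
            unfold formula
            rw [hkey,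
                if_neg (by omega : ¬ (cnt x x.length (keyAt x m) = 1 ∨ cnt x m (keyAt x m) = 0)),
                if_pos ht, if_pos hordj0]
          rw [hfmm, hfmj, hfj, add_zero]
        · have hfmm : formula x m m = valAt x m := by
            unfold formula
            rw [if_neg (by omega : ¬ (cnt x x.length (keyAt x m) = 1 ∨ cnt x m (keyAt x m) = 0)),
                if_neg ht, if_neg (by omega : ¬ cnt x m (keyAt x m) = 0),
                if_neg (by omega : ¬ cnt x m (keyAt x m) < cnt x m (keyAt x m))]
          have hfmj : formula x m p = gsum x m (keyAt x m) := by
            unfold formula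
            rw [hkey,
                if_neg (by omega : ¬ (cnt x x.length (keyAt x m) = 1 ∨ cnt x m (keyAt x m) = 0)),
                if_neg ht, if_pos hordj0]
          rw [hfmm, hfmj, hfj, hgs]
          ring
      · rw [if_neg hpm, if_neg hpj]
        by_cases hkp : keyAt x p = keyAt x m
        · have hop : cnt x p (keyAt x m) ≠ 0 :=
            fun h0 => hpj (ord_inj x hkp hkey (by omega))
          have hopm : cnt x p (keyAt x m) ≠ cnt x m (keyAt x m) :=
            fun h0 => hpm (ord_inj x hkp rfl h0)
          by_cases ht : cnt x m (keyAt x m) = 1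
          · have hop2 : 2 ≤ cnt x p (keyAt x m) := by omega
            have hfa : formula x m p = valAt x p := by
              unfold formula
              rw [hkp,
                  if_neg (by omega : ¬ (cnt x x.length (keyAt x m) = 1 ∨ cnt x m (keyAt x m) = 0)),
                  if_pos ht, if_neg (by omega : ¬ cnt x p (keyAt x m) = 0),
                  if_neg (by omega : ¬ cnt x p (keyAt x m) = 1)]
            have hfb : formula x (m + 1) p = valAt x p := by
              unfold formula
              rw [hkp, hsucc,
                  if_neg (by omega :
                    ¬ (cnt x x.length (keyAt x m) = 1 ∨ cnt x m (keyAt x m) + 1 = 0)),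
                  if_neg (by omega : ¬ cnt x m (keyAt x m) + 1 = 1),
                  if_neg (by omega : ¬ cnt x p (keyAt x m) = 0),
                  if_neg (by omega : ¬ cnt x p (keyAt x m) < cnt x m (keyAt x m) + 1)]
            rw [hfa, hfb]
          · by_cases hlt : cnt x p (keyAt x m) < cnt x m (keyAt x m)
            · have hfa : formula x m p = 0 := by
                unfold formula
                rw [hkp,
                    if_neg (by omega : ¬ (cnt x x.length (keyAt x m) = 1 ∨ cnt x m (keyAt x m) = 0)),
                    if_neg ht, if_neg (by omega : ¬ cnt x p (keyAt x m) = 0), if_pos hlt]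
              have hfb : formula x (m + 1) p = 0 := by
                unfold formula
                rw [hkp, hsucc,
                    if_neg (by omega :
                      ¬ (cnt x x.length (keyAt x m) = 1 ∨ cnt x m (keyAt x m) + 1 = 0)),
                    if_neg (by omega : ¬ cnt x m (keyAt x m) + 1 = 1),
                    if_neg (by omega : ¬ cnt x p (keyAt x m) = 0),
                    if_pos (by omega : cnt x p (keyAt x m) < cnt x m (keyAt x m) + 1)]
              rw [hfa, hfb]
            · have hfa : formula x m p = valAt x p := by
                unfold formula
                rw [hkp,
                    if_neg (by omega : ¬ (cnt x x.length (keyAt x m) = 1 ∨ cnt x m (keyAt x m) = 0)),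
                    if_neg ht, if_neg (by omega : ¬ cnt x p (keyAt x m) = 0), if_neg hlt]
              have hfb : formula x (m + 1) p = valAt x p := by
                unfold formula
                rw [hkp, hsucc,
                    if_neg (by omega :
                      ¬ (cnt x x.length (keyAt x m) = 1 ∨ cnt x m (keyAt x m) + 1 = 0)),
                    if_neg (by omega : ¬ cnt x m (keyAt x m) + 1 = 1),
                    if_neg (by omega : ¬ cnt x p (keyAt x m) = 0),
                    if_neg (by omega : ¬ cnt x p (keyAt x m) < cnt x m (keyAt x m) + 1)]
              rw [hfa, hfb]
        · unfold formula
          rw [hsucc' _ hkp, hgs' _ hkp]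

-- rewriting the two-cell update produced by the inner loop as stateSpec (m+1)
lemma update_eq_stateSpec (x : List (List Int)) {m j₀ : Nat}
    (hm : m < x.length) (hj₀ : j₀ < x.length) (hne : j₀ ≠ m)
    (hval : ∀ p, p < x.length →
      (if p = m then 0
       else if p = j₀ then formula x m m + formula x m j₀
       else formula x m p) = formula x (m + 1) p) :
    setVal (setVal (stateSpec x m) j₀ (formula x m m + formula x m j₀)) m 0 =
      stateSpec x (m + 1) := by
  apply List.ext_getElem
  · simp [length_setVal, stateSpec]
  · intro p h1 h2
    have hp : p < x.length := by
      simpa [length_setVal, length_stateSpec] using h1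
    have hsl : p < (stateSpec x m).length := by
      rw [length_stateSpec]; exact hp
    rw [getElem_setVal _ _ _ (by rw [length_setVal, length_stateSpec]; exact hp) h1,
        getElem_stateSpec x (m + 1) hp h2]
    by_cases hpm : p = m
    · subst hpm
      rw [if_pos rfl, getD_setVal_ne _ _ (fun e => hne e.symm),
          getD_stateSpec x _ hp, List.set_set]
      have h := hval p hp
      rw [if_pos rfl] at h
      rw [← h]
    · rw [if_neg hpm, getElem_setVal _ _ _ hsl (by rw [length_setVal]; exact hsl)]
      by_cases hpj : p = j₀
      · subst hpj
        rw [if_pos rfl, getD_stateSpec x m hp, List.set_set]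
        have h := hval p hp
        rw [if_neg hpm, if_pos rfl] at h
        rw [← h]
      · rw [if_neg hpj, getElem_stateSpec x m hp hsl]
        have h := hval p hp
        rw [if_neg hpm, if_neg hpj] at h
        rw [h]

-- one full outer iteration of A maps stateSpec m to stateSpec (m+1)
lemma step_spec (x : List (List Int)) (hpre : ∀ r ∈ x, 2 ≤ r.length) {m : Nat}
    (hm : m < x.length) : innerN (stateSpec x m) m = stateSpec x (m + 1) := by
  have hkeq : ∀ p, p < x.length → keyAt (stateSpec x m) p = keyAt x p :=
    fun p hp => keyAt_stateSpec x m hp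
  have hrows : ∀ p, p < (stateSpec x m).length →
      2 ≤ ((stateSpec x m).getD p []).length := by
    intro p hp
    rw [length_stateSpec] at hp
    rw [rowlen_stateSpec x m hp]
    exact row_len x hpre hp
  by_cases hex : ∃ j, j < x.length ∧ j ≠ m ∧ keyAt x j = keyAt x m
  · obtain ⟨j, hj, hjm, hjk⟩ := hex
    have hj₀ex : ∃ j₀, j₀ < x.length ∧ j₀ ≠ m ∧ keyAt x j₀ = keyAt x m ∧
        (∀ jj, jj < j₀ → jj ≠ m → keyAt x jj ≠ keyAt x m) := by
      by_cases ht : cnt x m (keyAt x m) = 0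
      · have hsz2 : 1 < cnt x x.length (keyAt x m) := by
          rcases Nat.lt_trichotomy j m with h | h | h
          · have h1 := cnt_lt_of_mem x h hjk
            have h2 := cnt_lt_of_mem x hm (rfl : keyAt x m = keyAt x m)
            omega
          · exact absurd h hjm
          · have h1 := cnt_lt_of_mem x h (rfl : keyAt x m = keyAt x m)
            have h2 := cnt_lt_of_mem x hj hjk
            omega
        obtain ⟨j₀, h1, h2, h3⟩ := exists_ord x hsz2
        refine ⟨j₀, h1, ?_, h2, ?_⟩
        · intro e
          rw [e] at h3
          omega
        · intro jj hlt hnejj hkk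
          have h4 := cnt_lt_of_mem x hlt hkk
          have h5 : jj = m := ord_inj x hkk (rfl : keyAt x m = keyAt x m) (by omega)
          exact hnejj h5
      · obtain ⟨j₀, h1, h2, h3⟩ := exists_ord x (show 0 < cnt x m (keyAt x m) by omega)
        refine ⟨j₀, by omega, by omega, h2, ?_⟩
        intro jj hlt hnejj hkk
        have h4 := cnt_lt_of_mem x hlt hkk
        omega
    obtain ⟨j₀, hj₀n, hj₀m, hj₀k, hmin⟩ := hj₀ex
    rw [inner_match (stateSpec x m) m j₀
          (by rw [length_stateSpec]; exact hm)
          (by rw [length_stateSpec]; exact hj₀n)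
          hj₀m
          (by rw [hkeq j₀ hj₀n, hkeq m hm]; exact hj₀k)
          (by
            intro jj hlt hnejj
            rw [hkeq jj (by omega), hkeq m hm]
            exact hmin jj hlt hnejj)
          hrows,
        valAt_stateSpec x hpre m hm, valAt_stateSpec x hpre m hj₀n]
    exact update_eq_stateSpec x hm hj₀n hj₀m
      (formula_step x hm hj₀n hj₀m hj₀k hmin)
  · have hno : ∀ j, j < x.length → j ≠ m → keyAt x j ≠ keyAt x m :=
      fun j h1 h2 hkk => hex ⟨j, h1, h2, hkk⟩
    rw [inner_no_match (stateSpec x m) m (by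
      intro j hjl hjm
      rw [length_stateSpec] at hjl
      rw [hkeq j hjl, hkeq m hm]
      exact hno j hjl hjm)]
    unfold stateSpec
    apply List.map_congr_left
    intro p hp
    rw [List.mem_range] at hp
    rw [formula_nomatch x hm hno p hp]

lemma stateSpec_zero (x : List (List Int)) (hpre : ∀ r ∈ x, 2 ≤ r.length) :
    stateSpec x 0 = x := by
  apply List.ext_getElem
  · simp [stateSpec]
  · intro p h1 h2
    rw [getElem_stateSpec x 0 h2 h1]
    have hform : formula x 0 p = valAt x p := by
      unfold formula
      rw [if_pos (by right; simp [cnt])]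
    rw [hform]
    unfold valAt
    rw [set1_getD1 _ (row_len x hpre h2), getD_eq_get _ _ h2]

lemma outer_spec (x : List (List Int)) (hpre : ∀ r ∈ x, 2 ≤ r.length) :
    ∀ m, m ≤ x.length → (List.range m).foldl innerN x = stateSpec x m := by
  intro m
  induction m with
  | zero =>
      intro _
      simp [stateSpec_zero x hpre]
  | succ m ih =>
      intro hm
      rw [List.range_succ, List.foldl_append, ih (by omega)]
      simp only [List.foldl_cons, List.foldl_nil]
      exact step_spec x hpre (by omega)

lemma formula_final (x : List (List Int)) {p : Nat} (hp : p < x.length) :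
    formula x x.length p =
      if cnt x p (keyAt x p) = 0 then gsum x x.length (keyAt x p) else 0 := by
  have ho : cnt x p (keyAt x p) < cnt x x.length (keyAt x p) :=
    cnt_lt_of_mem x hp (rfl : keyAt x p = keyAt x p)
  by_cases hsz : cnt x x.length (keyAt x p) = 1
  · have h0 : cnt x p (keyAt x p) = 0 := by omega
    have h1 : cnt x (p + 1) (keyAt x p) = 1 := by
      rw [cnt_succ, h0]
      simp
    have hgn : gsum x x.length (keyAt x p) = valAt x p := by
      have h2 : gsum x x.length (keyAt x p) = gsum x (p + 1) (keyAt x p) := by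
        rcases Nat.eq_or_lt_of_le (show p + 1 ≤ x.length by omega) with h | h
        · rw [h]
        · refine gsum_of_no_mem x (by omega) ?_
          intro q hq1 hq2 hkq
          have h3 := cnt_le x (keyAt x p) hq1
          have h4 := cnt_lt_of_mem x (show q < x.length by omega) hkq
          omega
      rw [h2, gsum_succ, gsum_zero_of_cnt x h0]
      simp
    unfold formula
    rw [if_pos (Or.inl hsz), if_pos h0, hgn]
  · unfold formula
    rw [if_neg (by omega :
          ¬ (cnt x x.length (keyAt x p) = 1 ∨ cnt x x.length (keyAt x p) = 0)),
        if_neg (by omega : ¬ cnt x x.length (keyAt x p) = 1)]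
    by_cases h0 : cnt x p (keyAt x p) = 0
    · rw [if_pos h0, if_pos h0]
    · rw [if_neg h0, if_neg h0, if_pos (by omega)]

lemma A_eq_final (x : List (List Int)) (hpre : ∀ r ∈ x, 2 ≤ r.length) :
    Sum_Lit x = finalSpec x := by
  rw [natifyA, outer_spec x hpre x.length (le_refl _)]
  unfold stateSpec finalSpec
  apply List.map_congr_left
  intro p hp
  rw [List.mem_range] at hp
  rw [formula_final x hp]

-- ===== B side =====
lemma getD_sums_aux (l : List (List Int)) (d : PySem.Dict Int Int) (k : Int) :
    (l.foldl sumStepN d).getD k 0 =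
      d.getD k 0 + ((l.filter (fun r => decide (r.getD 0 0 = k))).map
        (fun r => r.getD 1 0)).sum := by
  induction l generalizing d with
  | nil => simp
  | cons r l ih =>
      rw [List.foldl_cons, ih]
      unfold sumStepN
      by_cases h : r.getD 0 0 = k
      · rw [h, PySem.Dict.getD_insert_self,
            List.filter_cons_of_pos (by simpa using h), List.map_cons, List.sum_cons]
        ring
      · rw [PySem.Dict.getD_insert_of_ne _ _ _ (fun e => h e.symm),
            List.filter_cons_of_neg (by simpa using h)]

lemma map_getD_range (x : List (List Int)) :
    (List.range x.length).map (fun q => x.getD q []) = x := by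
  apply List.ext_getElem
  · simp
  · intro p h1 h2
    simp [List.getElem?_eq_getElem h2]

lemma getD_sumsOf (x : List (List Int)) (k : Int) :
    (sumsOf x).getD k 0 = gsum x x.length k := by
  unfold sumsOf
  rw [getD_sums_aux, PySem.Dict.getD_empty, zero_add]
  unfold gsum
  conv_lhs => rw [← map_getD_range x]
  rw [List.filter_map, List.map_map]
  rfl

lemma length_finalSpec (x : List (List Int)) : (finalSpec x).length = x.length := by
  simp [finalSpec]

lemma getElem?_finalSpec (x : List (List Int)) {m : Nat} (hm : m < x.length) :
    (finalSpec x)[m]? = some ((x.getD m []).set 1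
      (if cnt x m (keyAt x m) = 0 then gsum x x.length (keyAt x m) else 0)) := by
  unfold finalSpec
  rw [List.getElem?_map, List.getElem?_range hm]
  rfl

lemma pass2_go (x : List (List Int)) (c : Nat) :
    ∀ (m : Nat), x.length - m ≤ c → m ≤ x.length →
    ∀ (seen : PySem.Set Int), (∀ k, seen.contains k = true ↔ cnt x m k ≠ 0) →
    ((x.drop m).foldl (pass2Step (sumsOf x)) ((finalSpec x).take m, seen)).1 = finalSpec x := by
  induction c with
  | zero =>
      intro m hc hm seen _
      have hmn : m = x.length := by omega
      subst hmn
      rw [List.drop_length]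
      simp [List.take_of_length_le (le_of_eq (length_finalSpec x))]
  | succ c ih =>
      intro m hc hm seen hseen
      rcases Nat.eq_or_lt_of_le hm with hmn | hmlt
      · subst hmn
        rw [List.drop_length]
        simp [List.take_of_length_le (le_of_eq (length_finalSpec x))]
      · rw [List.drop_eq_getElem_cons hmlt, List.foldl_cons]
        have hkey : x[m].getD 0 0 = keyAt x m := by
          unfold keyAt
          rw [getD_eq_get x [] hmlt]
        by_cases hc2 : seen.contains (x[m].getD 0 0) = true
        · have hcnt : cnt x m (keyAt x m) ≠ 0 := by
            rw [← hkey]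
            exact (hseen _).mp hc2
          have hstep : pass2Step (sumsOf x) ((finalSpec x).take m, seen) x[m] =
              ((finalSpec x).take (m + 1), seen) := by
            unfold pass2Step
            rw [if_pos hc2]
            rw [List.take_add_one, getElem?_finalSpec x hmlt]
            rw [if_neg hcnt]
            rw [getD_eq_get x [] hmlt]
            rfl
          rw [hstep]
          apply ih (m + 1) (by omega) (by omega) seen
          intro k'
          rw [hseen k', cnt_succ]
          by_cases hkk : keyAt x m = k'
          · rw [if_pos hkk]
            rw [← hkk]
            constructor
            · intro _; omega
            · intro _; exact hcnt
          · rw [if_neg hkk]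
            omega
          
        · have hcnt : cnt x m (keyAt x m) = 0 := by
            by_contra h0
            exact hc2 ((hseen _).mpr (hkey ▸ h0))
          have hstep : pass2Step (sumsOf x) ((finalSpec x).take m, seen) x[m] =
              ((finalSpec x).take (m + 1), seen.add (keyAt x m)) := by
            unfold pass2Step
            rw [if_neg hc2]
            rw [List.take_add_one, getElem?_finalSpec x hmlt]
            rw [if_pos hcnt, hkey, getD_sumsOf]
            rw [getD_eq_get x [] hmlt]
            rfl
          rw [hstep]
          apply ih (m + 1) (by omega) (by omega) (seen.add (keyAt x m))
          intro k'
          rw [PySem.Set.contains_iff, PySem.Set.mem_add, ← PySem.Set.contains_iff,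
            hseen k', cnt_succ]
          by_cases hkk : keyAt x m = k'
          · rw [if_pos hkk]
            constructor
            · intro _; omega
            · intro _; right; exact hkk.symm
          · rw [if_neg hkk]
            constructor
            · rintro (h | h)
              · omega
              · exact absurd h.symm hkk
            · intro h; left; omega

lemma B_eq_final (x : List (List Int)) : Sum_Lit_alt x = finalSpec x := by
  rw [natifyB]
  unfold altN
  have h := pass2_go x x.length 0 (by omega) (by omega) PySem.Set.empty
    (fun k => by
      constructor
      · intro h
        rw [PySem.Set.contains_iff] at h
        simp [PySem.Set.empty] at h
      · intro h
        simp [cnt] at h)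
  simpa using h

-- ===== VERDICT (by name: the statement is the Claim_ definition above) =====
theorem Sum_Lit_spec : Claim_equal_Sum_Lit := by
  intro x _ hpre
  unfold Spec_Sum_Lit
  rw [A_eq_final x hpre, B_eq_final x]
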